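-- pv_equiv track=rewrite | github.com/navierula/snowball-poem-generator | snowball.py | generate_bigram_pairs
-- ===== SOURCE A (Python) =====
-- def generate_bigram_pairs(bigrams):
--
--     pairs = []
--
--     for key, val in bigrams.items():
--         for word in val:
--             if len(word) - len(key) == 1:
--                 pairs.append([key, word])
--
--     pairs.sort(key=lambda x: len(x[0]))
--
--     generations = {}
--
--     for pair in pairs:
--         lengths = str(len(pair[0])) + ":" + str(len(pair[1]))
--
--         if lengths not in generations:
--             generations[lengths] = [pair]
--         else:
--             generations[lengths].append(pair)
--
--     return generations
-- ===== SOURCE B (Python) =====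
-- def generate_bigram_pairs(bigrams):
--     buckets = {}
--     for key, val in bigrams.items():
--         n = len(key)
--         for word in val:
--             if len(word) == n + 1:
--                 buckets.setdefault(n, []).append([key, word])
--     return {"%d:%d" % (n, n + 1): buckets[n] for n in sorted(buckets)}
-- ===== Notes on version B (the rewrite author's own statement) =====
-- stated objective: alternative
-- what changed: B buckets qualifying pairs by key length in one pass over the dict (a length-keyed table, encounter order preserved) and then sorts only the distinct lengths to emit the groups, instead of A's sort of the full pair list followed by a linear grouping pass.
import Mathlib
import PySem

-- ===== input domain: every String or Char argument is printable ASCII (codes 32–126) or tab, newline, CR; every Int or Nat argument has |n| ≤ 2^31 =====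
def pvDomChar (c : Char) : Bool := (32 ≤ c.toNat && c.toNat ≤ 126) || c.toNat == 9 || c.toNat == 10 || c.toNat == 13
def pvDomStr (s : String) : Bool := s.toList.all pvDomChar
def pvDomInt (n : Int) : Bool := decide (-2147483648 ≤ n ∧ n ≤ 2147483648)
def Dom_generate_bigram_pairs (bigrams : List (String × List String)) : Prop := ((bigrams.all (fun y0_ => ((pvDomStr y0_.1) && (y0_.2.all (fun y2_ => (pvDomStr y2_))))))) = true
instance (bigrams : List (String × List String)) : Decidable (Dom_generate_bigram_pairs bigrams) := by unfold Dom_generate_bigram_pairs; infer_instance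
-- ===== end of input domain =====

-- B buckets qualifying pairs by key length in one pass and sorts only the distinct lengths,
-- instead of A's sort of the whole pair list followed by a linear grouping pass (alternative decomposition).

-- ===== PORT A =====
-- pair[0] / pair[1] are read with PySem.List.pyGetD; every pair built by the loop is [key, word],
-- so index 0/1 never leaves the range and the default is never used (exact).
def generate_bigram_pairs (bigrams : List (String × List String)) : List (String × List (List String)) :=
  let pairs : List (List String) :=
    bigrams.foldl (fun acc kv =>
      kv.2.foldl (fun acc word =>
        if PySem.Str.len word - PySem.Str.len kv.1 == 1 then acc ++ [[kv.1, word]] else acc) acc) []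
  let sortedPairs := PySem.List.sorted pairs (fun x => PySem.Str.len (PySem.List.pyGetD x 0 ""))
  let generations : PySem.Dict String (List (List String)) :=
    sortedPairs.foldl (fun d pair =>
      let lengths := PySem.Int.toStr (PySem.Str.len (PySem.List.pyGetD pair 0 "")) ++ ":" ++
                     PySem.Int.toStr (PySem.Str.len (PySem.List.pyGetD pair 1 ""))
      if !(d.contains lengths) then d.insert lengths [pair] else d.modify lengths [] (· ++ [pair]))
      PySem.Dict.empty
  generations.items

-- ===== PORT B =====
-- buckets.setdefault(n, []).append(p) is Dict.modify n [] (· ++ [p]) (d[n] = d.get(n, []) + [p]).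
def generate_bigram_pairs_alt (bigrams : List (String × List String)) : List (String × List (List String)) :=
  let buckets : PySem.Dict Int (List (List String)) :=
    bigrams.foldl (fun d kv =>
      let n := PySem.Str.len kv.1
      kv.2.foldl (fun d word =>
        if PySem.Str.len word == n + 1 then d.modify n [] (· ++ [[kv.1, word]]) else d) d)
      PySem.Dict.empty
  (PySem.List.sorted buckets.keys (fun x => x)).map
    (fun n => (PySem.Int.toStr n ++ ":" ++ PySem.Int.toStr (n + 1), buckets.getD n []))

-- ===== PRECONDITION & SPEC =====
def Spec_generate_bigram_pairs (bigrams : List (String × List String)) (out : List (String × List (List String))) : Prop := out = generate_bigram_pairs_alt bigrams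
instance (bigrams : List (String × List String)) (out : List (String × List (List String))) : Decidable (Spec_generate_bigram_pairs bigrams out) := by unfold Spec_generate_bigram_pairs; infer_instance

-- ===== CLAIM (what is proved, stated in full; the proofs are below) =====
def Claim_equal_generate_bigram_pairs : Prop := ∀ (bigrams : List (String × List String)), Dom_generate_bigram_pairs bigrams → Spec_generate_bigram_pairs bigrams (generate_bigram_pairs bigrams)

-- ===== LEMMAS AND PROOFS =====

-- proof-only abbreviations
def pvKlen (p : List String) : Int := PySem.Str.len (PySem.List.pyGetD p 0 "")
def pvWlen (p : List String) : Int := PySem.Str.len (PySem.List.pyGetD p 1 "")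
def pvLab (n : Int) : String := PySem.Int.toStr n ++ ":" ++ PySem.Int.toStr (n + 1)
-- the qualifying pairs in encounter order
def pvQP (bigrams : List (String × List String)) : List (List String) :=
  bigrams.flatMap (fun kv =>
    (kv.2.filter (fun w => PySem.Str.len w - PySem.Str.len kv.1 == 1)).map (fun w => [kv.1, w]))

-- ---- str(n) is injective ----
def pvEvalD (cs : List Char) : Nat := cs.foldl (fun a c => 10 * a + (c.toNat - 48)) 0

lemma pvEvalD_append_singleton (cs : List Char) (c : Char) :
    pvEvalD (cs ++ [c]) = 10 * pvEvalD cs + (c.toNat - 48) := by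
  simp [pvEvalD]

lemma pvEvalD_toDigits (n : Nat) : pvEvalD (Nat.toDigits 10 n) = n := by
  induction n using Nat.strong_induction_on with
  | _ n ih =>
    rw [Nat.toDigits_eq_if (by omega)]
    by_cases h : n < 10
    · simp only [if_pos h]
      interval_cases n <;> decide
    · simp only [if_neg h]
      rw [pvEvalD_append_singleton, ih (n / 10) (by omega)]
      have h10 : n % 10 < 10 := Nat.mod_lt _ (by omega)
      have hc : (n % 10).digitChar.toNat - 48 = n % 10 := by
        set k := n % 10 with hk
        interval_cases k <;> decide
      omega

lemma pvToDigits_inj {m n : Nat} (h : Nat.toDigits 10 m = Nat.toDigits 10 n) : m = n := by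
  have := congrArg pvEvalD h
  rwa [pvEvalD_toDigits, pvEvalD_toDigits] at this

lemma pvToChars_inj : Function.Injective PySem.Int.toChars := by
  intro m n h
  unfold PySem.Int.toChars at h
  by_cases hm : m < 0 <;> by_cases hn : n < 0 <;> simp only [if_pos, hm, hn, if_false] at h
  · have := pvToDigits_inj (List.cons.inj h).2
    omega
  · exfalso
    have hmem : '-' ∈ Nat.toDigits 10 n.toNat := h ▸ List.mem_cons_self
    have := Nat.isDigit_of_mem_toDigits (by omega) (by omega) hmem
    simp [Char.isDigit] at this
  · exfalso
    have hmem : '-' ∈ Nat.toDigits 10 m.toNat := h.symm ▸ List.mem_cons_self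
    have := Nat.isDigit_of_mem_toDigits (by omega) (by omega) hmem
    simp [Char.isDigit] at this
  · have := pvToDigits_inj h
    omega

lemma pvColon_not_mem_toChars (n : Int) : ':' ∉ PySem.Int.toChars n := by
  intro hmem
  unfold PySem.Int.toChars at hmem
  by_cases hn : n < 0 <;> simp only [if_pos, hn, if_false] at hmem
  · rcases List.mem_cons.mp hmem with h | h
    · exact absurd h (by decide)
    · have := Nat.isDigit_of_mem_toDigits (b := 10) (by omega) (by omega) h
      simp [Char.isDigit] at this
  · have := Nat.isDigit_of_mem_toDigits (b := 10) (by omega) (by omega) hmem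
    simp [Char.isDigit] at this

lemma pvSplit_colon (a c b d : List Char) (ha : ':' ∉ a) (hb : ':' ∉ b)
    (h : a ++ ':' :: c = b ++ ':' :: d) : a = b := by
  induction a generalizing b with
  | nil =>
    cases b with
    | nil => rfl
    | cons y ys =>
      simp only [List.nil_append, List.cons_append, List.cons.injEq] at h
      exact absurd (h.1 ▸ List.mem_cons_self) hb
  | cons x xs ih =>
    cases b with
    | nil =>
      simp only [List.cons_append, List.nil_append, List.cons.injEq] at h
      exact absurd (h.1.symm ▸ List.mem_cons_self) ha
    | cons y ys =>
      simp only [List.cons_append, List.cons.injEq] at h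
      have := ih ys (fun hx => ha (List.mem_cons_of_mem _ hx)) (fun hx => hb (List.mem_cons_of_mem _ hx)) h.2
      rw [h.1, this]

lemma pvLab_inj : Function.Injective pvLab := by
  intro m n h
  have h' := congrArg String.toList h
  simp only [pvLab, String.toList_append, PySem.Int.toList_toStr] at h'
  have hcolon : (":" : String).toList = [':'] := rfl
  rw [hcolon] at h'
  have h2 : PySem.Int.toChars m ++ ':' :: PySem.Int.toChars (m + 1)
      = PySem.Int.toChars n ++ ':' :: PySem.Int.toChars (n + 1) := by
    simpa using h'
  exact pvToChars_inj (pvSplit_colon _ _ _ _ (pvColon_not_mem_toChars m) (pvColon_not_mem_toChars n) h2)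

-- ---- Set.ofList commutes with an injective map ----
lemma pvOfList_map {α β : Type} [DecidableEq α] [DecidableEq β] (f : α → β)
    (hf : Function.Injective f) (l : List α) :
    PySem.Set.ofList (l.map f) = (PySem.Set.ofList l).map f := by
  induction l with
  | nil => rfl
  | cons x xs ih =>
    rw [List.map_cons, PySem.Set.ofList_cons, PySem.Set.ofList_cons, ih]
    simp only [PySem.Set.discard, List.filter_map, List.map_cons, List.cons.injEq, true_and]
    congr 1
    apply List.filter_congr
    intro y _
    have hbe : (f y == f x) = (y == x) := by
      by_cases hy : y = x
      · simp [hy]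
      · simp [hy, hf.ne hy]
    simp [Function.comp, hbe]

-- ---- dedup of a ≤-sorted list is <-sorted ----
lemma pvPairwise_lt_ofList (l : List Int) (h : l.Pairwise (· ≤ ·)) :
    (PySem.Set.ofList l).Pairwise (· < ·) := by
  induction l with
  | nil => exact List.Pairwise.nil
  | cons x xs ih =>
    rw [PySem.Set.ofList_cons]
    rcases h with - | ⟨hx, hxs⟩
    constructor
    · intro y hy
      simp only [PySem.Set.discard, List.mem_filter, Bool.not_eq_eq_eq_not, Bool.not_true,
        beq_eq_false_iff_ne, ne_eq] at hy
      have hmem : y ∈ xs := (PySem.Set.mem_ofList xs y).mp hy.1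
      exact lt_of_le_of_ne (hx y hmem) (fun he => hy.2 he.symm)
    · exact (ih hxs).sublist List.filter_sublist

-- ---- stability: filtering an equal-key class commutes with the sort ----
lemma pvInsertBy_filter {α : Type} (key : α → Int) (c : Int) (x : α) (ys : List α)
    (hs : ys.Pairwise (fun a b => key a ≤ key b)) :
    (PySem.List.insertBy (fun a b => decide (key a < key b)) x ys).filter (fun z => key z == c)
      = if key x = c then ys.filter (fun z => key z == c) ++ [x]
        else ys.filter (fun z => key z == c) := by
  induction ys with
  | nil =>
    by_cases h : key x = c <;> simp [PySem.List.insertBy, List.filter, h]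
  | cons y t ih =>
    rcases hs with _ | ⟨hy, ht⟩
    have hstep : PySem.List.insertBy (fun a b => decide (key a < key b)) x (y :: t)
        = if key x < key y then x :: y :: t
          else y :: PySem.List.insertBy (fun a b => decide (key a < key b)) x t := by
      simp [PySem.List.insertBy]
    rw [hstep]
    by_cases hlt : key x < key y
    · rw [if_pos hlt]
      by_cases hc : key x = c
      · have hnil : (y :: t).filter (fun z => key z == c) = [] := by
          apply List.filter_eq_nil_iff.mpr
          intro z hz
          have hz' : key y ≤ key z := by
            rcases List.mem_cons.mp hz with h | h
            · exact h ▸ le_refl _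
            · exact hy z h
          simp only [beq_iff_eq]
          omega
        simp [hnil, hc]
      · simp [List.filter_cons, hc, beq_iff_eq]
    · rw [if_neg hlt, List.filter_cons, List.filter_cons, ih ht]
      by_cases hyc : key y = c <;> by_cases hc : key x = c <;>
        simp [hyc, hc, beq_iff_eq]

lemma pvSorted_filter {α : Type} (xs : List α) (key : α → Int) (c : Int) :
    (PySem.List.sorted xs key).filter (fun z => key z == c) = xs.filter (fun z => key z == c) := by
  induction xs using List.reverseRecOn with
  | nil => rfl
  | append_singleton xs x ih =>
    rw [PySem.List.sorted_eq_foldl_insertBy, List.foldl_append]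
    simp only [List.foldl_cons, List.foldl_nil]
    rw [← PySem.List.sorted_eq_foldl_insertBy,
      pvInsertBy_filter key c x _ (PySem.List.sorted_pairwise xs key), List.filter_append]
    by_cases hc : key x = c <;> simp [hc, ih, beq_iff_eq]

-- ---- the pair list of A is pvQP ----
lemma pvPairs_eq (bigrams : List (String × List String)) :
    bigrams.foldl (fun acc kv =>
      kv.2.foldl (fun acc word =>
        if PySem.Str.len word - PySem.Str.len kv.1 == 1 then acc ++ [[kv.1, word]] else acc) acc) []
    = pvQP bigrams := by
  have h : ∀ kv : String × List String, ∀ acc : List (List String),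
      kv.2.foldl (fun acc word =>
        if PySem.Str.len word - PySem.Str.len kv.1 == 1 then acc ++ [[kv.1, word]] else acc) acc
      = acc ++ (kv.2.filter (fun w => PySem.Str.len w - PySem.Str.len kv.1 == 1)).map
          (fun w => [kv.1, w]) := by
    intro kv acc
    exact PySem.List.foldl_append_if _ _ _ _
  calc bigrams.foldl _ []
      = bigrams.foldl (fun acc kv => acc ++ (kv.2.filter
          (fun w => PySem.Str.len w - PySem.Str.len kv.1 == 1)).map (fun w => [kv.1, w])) [] := by
        apply PySem.List.foldl_congr_mem
        intro acc kv _
        exact h kv acc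
    _ = pvQP bigrams := by
        rw [PySem.List.foldl_append_eq_flatMap]
        rfl

-- shape of the members of pvQP
lemma pvQP_mem_shape (bigrams : List (String × List String)) (p : List String)
    (hp : p ∈ pvQP bigrams) :
    pvWlen p = pvKlen p + 1 ∧ 0 ≤ pvKlen p := by
  simp only [pvQP, List.mem_flatMap, List.mem_map, List.mem_filter] at hp
  obtain ⟨kv, -, w, ⟨-, hw⟩, rfl⟩ := hp
  have hk : pvKlen [kv.1, w] = PySem.Str.len kv.1 := by
    simp [pvKlen, PySem.List.pyGetD, PySem.List.pyIdx?, PySem.List.pyGet?]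
  have hww : pvWlen [kv.1, w] = PySem.Str.len w := by
    simp [pvWlen, PySem.List.pyGetD, PySem.List.pyIdx?, PySem.List.pyGet?]
  rw [hk, hww]
  simp only [beq_iff_eq] at hw
  constructor
  · omega
  · rw [PySem.Str.len_eq]; positivity

-- ---- B's bucket dict as a fold over pvQP ----
lemma pvInner (k : String) (ws : List String) (d : PySem.Dict Int (List (List String))) :
    ws.foldl (fun d w =>
      if PySem.Str.len w == PySem.Str.len k + 1 then
        d.modify (PySem.Str.len k) [] (· ++ [[k, w]]) else d) d
    = ((ws.filter (fun w => PySem.Str.len w - PySem.Str.len k == 1)).map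
        (fun w => [k, w])).foldl (fun d p => d.modify (pvKlen p) [] (· ++ [p])) d := by
  induction ws generalizing d with
  | nil => rfl
  | cons w ws ih =>
    simp only [List.foldl_cons, List.filter_cons]
    by_cases hc : PySem.Str.len w - PySem.Str.len k = 1
    · have h1 : (PySem.Str.len w == PySem.Str.len k + 1) = true := beq_iff_eq.mpr (by omega)
      have h2 : (PySem.Str.len w - PySem.Str.len k == 1) = true := beq_iff_eq.mpr hc
      have hk : pvKlen [k, w] = PySem.Str.len k := by
        simp [pvKlen, PySem.List.pyGetD, PySem.List.pyIdx?, PySem.List.pyGet?]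
      simp only [h1, h2, if_true, List.map_cons, List.foldl_cons, hk]
      exact ih _
    · have h1 : (PySem.Str.len w == PySem.Str.len k + 1) = false := beq_eq_false_iff_ne.mpr (by omega)
      have h2 : (PySem.Str.len w - PySem.Str.len k == 1) = false := beq_eq_false_iff_ne.mpr hc
      simp only [h1, h2, if_false, Bool.false_eq_true]
      exact ih d

lemma pvBuckets_eq (bigrams : List (String × List String)) (d : PySem.Dict Int (List (List String))) :
    bigrams.foldl (fun d kv =>
      kv.2.foldl (fun d word =>
        if PySem.Str.len word == PySem.Str.len kv.1 + 1 then
          d.modify (PySem.Str.len kv.1) [] (· ++ [[kv.1, word]]) else d) d) d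
    = (pvQP bigrams).foldl (fun d p => d.modify (pvKlen p) [] (· ++ [p])) d := by
  induction bigrams generalizing d with
  | nil => rfl
  | cons kv rest ih =>
    simp only [List.foldl_cons]
    rw [pvInner kv.1 kv.2 d, ih]
    conv_rhs => rw [pvQP, List.flatMap_cons, ← pvQP, List.foldl_append]

-- ---- the grouping fold, over an arbitrary pair list ----
lemma pvGroupStep (d : PySem.Dict String (List (List String))) (L : String) (p : List String) :
    (if !(d.contains L) then d.insert L [p] else d.modify L [] (· ++ [p]))
      = d.modify L [] (· ++ [p]) := by
  by_cases h : d.contains L = true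
  · simp [h]
  · have hc : d.contains L = false := by simpa using h
    have hget : d.getD L [] = [] := PySem.Dict.getD_of_not_contains d [] hc
    simp [hc, PySem.Dict.modify, hget]

lemma pvFold_getD {κ : Type} [BEq κ] [LawfulBEq κ] [DecidableEq κ] (key : List String → κ)
    (Q : List (List String)) (s : κ) (d : PySem.Dict κ (List (List String))) :
    (Q.foldl (fun d p => d.modify (key p) [] (· ++ [p])) d).getD s []
      = d.getD s [] ++ Q.filter (fun p => key p == s) := by
  induction Q generalizing d with
  | nil => simp
  | cons p Q ih =>
    rw [List.foldl_cons, ih, List.filter_cons, PySem.Dict.getD_modify]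
    by_cases hs : s = key p
    · simp [hs, List.append_assoc]
    · have hne : (key p == s) = false := beq_eq_false_iff_ne.mpr (fun h => hs h.symm)
      simp [hs, hne]

lemma pvFold_keys {κ : Type} [BEq κ] [LawfulBEq κ] (key : List String → κ)
    (Q : List (List String)) :
    (Q.foldl (fun d p => d.modify (key p) [] (· ++ [p])) PySem.Dict.empty).keys
      = PySem.Set.ofList (Q.map key) := by
  have h := PySem.Dict.keys_foldl_modify_key Q key [] (fun _ p v => v ++ [p]) PySem.Dict.empty
  rw [PySem.Dict.keys_empty, PySem.Set.update_nil_left] at h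
  exact h

lemma pvFold_nodup {κ : Type} [BEq κ] [LawfulBEq κ] (key : List String → κ)
    (Q : List (List String)) :
    (Q.foldl (fun d p => d.modify (key p) [] (· ++ [p])) PySem.Dict.empty).keys.Nodup := by
  exact PySem.Dict.nodup_keys_foldl_modify_key Q key [] (fun _ p v => v ++ [p]) PySem.Dict.empty
    (by rw [PySem.Dict.keys_empty]; exact List.nodup_nil)

-- the common canonical value of both programs
def pvLs (bigrams : List (String × List String)) : List Int :=
  PySem.Set.ofList ((PySem.List.sorted (pvQP bigrams) pvKlen).map pvKlen)

lemma pvCanon_getD {κ : Type} [BEq κ] [LawfulBEq κ] [DecidableEq κ] (key : List String → κ)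
    (Q : List (List String)) (s : κ) :
    (Q.foldl (fun d p => d.modify (key p) [] (· ++ [p])) PySem.Dict.empty).getD s []
      = Q.filter (fun p => key p == s) := by
  rw [pvFold_getD, PySem.Dict.getD_empty, List.nil_append]

-- ---- A's value ----
lemma pvA_eq (bigrams : List (String × List String)) :
    generate_bigram_pairs bigrams
      = (pvLs bigrams).map (fun n =>
          (pvLab n, (pvQP bigrams).filter (fun p => pvKlen p == n))) := by
  simp only [generate_bigram_pairs]
  rw [pvPairs_eq]
  have hkey : (fun x => PySem.Str.len (PySem.List.pyGetD x 0 "")) = pvKlen := rfl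
  rw [hkey]
  set S := PySem.List.sorted (pvQP bigrams) pvKlen with hS
  have hfold : S.foldl (fun d pair =>
      if !(d.contains (PySem.Int.toStr (PySem.Str.len (PySem.List.pyGetD pair 0 "")) ++ ":" ++
                       PySem.Int.toStr (PySem.Str.len (PySem.List.pyGetD pair 1 "")))) then
        d.insert (PySem.Int.toStr (PySem.Str.len (PySem.List.pyGetD pair 0 "")) ++ ":" ++
                  PySem.Int.toStr (PySem.Str.len (PySem.List.pyGetD pair 1 ""))) [pair]
      else d.modify (PySem.Int.toStr (PySem.Str.len (PySem.List.pyGetD pair 0 "")) ++ ":" ++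
                     PySem.Int.toStr (PySem.Str.len (PySem.List.pyGetD pair 1 ""))) [] (· ++ [pair]))
      PySem.Dict.empty
      = S.foldl (fun d p => d.modify (pvLab (pvKlen p)) [] (· ++ [p])) PySem.Dict.empty := by
    apply PySem.List.foldl_congr_mem
    intro acc p hp
    have hq : p ∈ pvQP bigrams := (PySem.List.mem_sorted _ _ _ _).mp hp
    obtain ⟨hw, h0⟩ := pvQP_mem_shape _ _ hq
    have hl : PySem.Int.toStr (PySem.Str.len (PySem.List.pyGetD p 0 "")) ++ ":" ++
        PySem.Int.toStr (PySem.Str.len (PySem.List.pyGetD p 1 "")) = pvLab (pvKlen p) := by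
      show PySem.Int.toStr (pvKlen p) ++ ":" ++ PySem.Int.toStr (pvWlen p) = _
      rw [hw, pvLab]
    rw [hl, pvGroupStep]
  rw [hfold]
  rw [PySem.Dict.items_eq_map_keys _ (pvFold_nodup (fun p => pvLab (pvKlen p)) S) []]
  rw [pvFold_keys]
  have hmm : S.map (fun p => pvLab (pvKlen p)) = (S.map pvKlen).map pvLab := by
    rw [List.map_map]; rfl
  rw [hmm, pvOfList_map pvLab pvLab_inj, ← pvLs, List.map_map]
  apply List.map_congr_left
  intro n _
  simp only [Function.comp_apply]
  rw [pvCanon_getD]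
  congr 1
  have hpred : (fun p => pvLab (pvKlen p) == pvLab n) = (fun p => pvKlen p == n) := by
    funext p
    by_cases h : pvKlen p = n
    · simp [h]
    · simp [h, pvLab_inj.ne h]
  rw [hpred, hS, pvSorted_filter]

-- ---- B's value ----
lemma pvB_eq (bigrams : List (String × List String)) :
    generate_bigram_pairs_alt bigrams
      = (pvLs bigrams).map (fun n =>
          (pvLab n, (pvQP bigrams).filter (fun p => pvKlen p == n))) := by
  simp only [generate_bigram_pairs_alt]
  rw [pvBuckets_eq]
  rw [pvFold_keys]
  have hsorted : PySem.List.sorted (PySem.Set.ofList ((pvQP bigrams).map pvKlen)) (fun x => x)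
      = pvLs bigrams := by
    apply PySem.List.sorted_eq_of_perm_of_pairwise_lt
    · apply (List.perm_ext_iff_of_nodup (PySem.Set.nodup_ofList _) (PySem.Set.nodup_ofList _)).mpr
      intro a
      simp only [PySem.Set.mem_ofList, List.mem_map]
      constructor
      · rintro ⟨p, hp, rfl⟩
        exact ⟨p, (PySem.List.mem_sorted _ _ _ _).mp hp, rfl⟩
      · rintro ⟨p, hp, rfl⟩
        exact ⟨p, (PySem.List.mem_sorted _ _ _ _).mpr hp, rfl⟩
    · exact pvPairwise_lt_ofList _ (PySem.List.sorted_map_key_pairwise _ _)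
  rw [hsorted]
  apply List.map_congr_left
  intro n _
  rw [pvCanon_getD]
  rfl

-- ===== VERDICT (by name: the statement is the Claim_ definition above) =====
theorem generate_bigram_pairs_spec : Claim_equal_generate_bigram_pairs := by
  intro bigrams _
  unfold Spec_generate_bigram_pairs
  rw [pvA_eq, pvB_eq]
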